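-- pv_equiv track=rewrite | github.com/BenjaminLohDW/CS203-Project-Tariff-fic-G1-1 | product/src/scrapers/captcha_resistant_scraper.py | check_word_order_relevance
-- ===== SOURCE A (Python) =====
-- def check_word_order_relevance(query_words, desc_words):
--     """Check if words appear in meaningful order"""
--     query_list = list(query_words)
--     desc_list = list(desc_words)
--
--     if len(query_list) <= 1:
--         return False
--
--     # Check if query words appear in similar order in description
--     query_positions = []
--     for word in query_list:
--         if word in desc_list:
--             query_positions.append(desc_list.index(word))
--
--     # If we found multiple words, check if they're in ascending order
--     if len(query_positions) > 1:
--         return query_positions == sorted(query_positions)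
--
--     return False
-- ===== SOURCE B (Python) =====
-- def check_word_order_relevance(query_words, desc_words):
--     query_list = list(query_words)
--     if len(query_list) <= 1:
--         return False
--     # Build first-occurrence index once instead of repeated .index scans
--     first_pos = {}
--     for i, w in enumerate(desc_words):
--         if w not in first_pos:
--             first_pos[w] = i
--     # Single monotone pass over the query words
--     prev = None
--     found = 0
--     for w in query_list:
--         i = first_pos.get(w)
--         if i is None:
--             continue
--         if prev is not None and i < prev:
--             return False
--         prev = i
--         found += 1
--     return found > 1
-- ===== Notes on version B (the rewrite author's own statement) =====
-- stated objective: faster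
-- what changed: Replaces repeated membership tests + list.index scans plus a sort-and-compare with a first-occurrence index dict built once and a single monotone pass over the query words with early exit on inversion.
import Mathlib
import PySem

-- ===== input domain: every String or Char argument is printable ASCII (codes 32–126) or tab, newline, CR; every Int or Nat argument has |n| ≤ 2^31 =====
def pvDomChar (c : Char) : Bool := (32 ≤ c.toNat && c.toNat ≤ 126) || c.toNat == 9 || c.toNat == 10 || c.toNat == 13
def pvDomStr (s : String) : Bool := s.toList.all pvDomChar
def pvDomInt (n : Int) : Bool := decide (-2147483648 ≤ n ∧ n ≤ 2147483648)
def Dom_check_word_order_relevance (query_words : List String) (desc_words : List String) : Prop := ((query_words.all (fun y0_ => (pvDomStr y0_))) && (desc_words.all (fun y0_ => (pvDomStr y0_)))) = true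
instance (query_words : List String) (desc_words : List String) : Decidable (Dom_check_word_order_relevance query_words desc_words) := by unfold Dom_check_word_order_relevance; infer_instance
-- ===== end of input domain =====

-- B replaces A's repeated `.index` scans and sort-and-compare with a first-occurrence
-- dict built once and a single monotone pass (objective: faster).

-- ===== PORT A =====
def check_word_order_relevance (query_words : List String) (desc_words : List String) : Bool :=
  if query_words.length ≤ 1 then false
  else
    let positions := query_words.foldl (fun acc w =>
      if w ∈ desc_words then
        -- `desc_list.index(word)`: guarded by the membership test, so `index?` is `some` here
        match PySem.List.index? desc_words w with
        | some i => acc ++ [i]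
        | none => acc
      else acc) ([] : List Nat)
    if 1 < positions.length then positions == PySem.List.sorted positions (fun x => x) false
    else false

-- ===== PORT B =====
-- first_pos: first-occurrence index of each word of desc
def pvBuildFirstPos (desc : List String) : PySem.Dict String Int :=
  (PySem.List.enumerate desc).foldl
    (fun d iw => if (d.get? iw.2).isSome then d else d.insert iw.2 iw.1) PySem.Dict.empty

def pvLoopB (first : PySem.Dict String Int) : List String → Option Int → Int → Bool
  | [], _, found => decide (1 < found)
  | w :: ws, prev, found =>
    match first.get? w with
    | none => pvLoopB first ws prev found
    | some i =>
      if (match prev with | some p => decide (i < p) | none => false) then false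
      else pvLoopB first ws (some i) (found + 1)

def check_word_order_relevance_alt (query_words : List String) (desc_words : List String) : Bool :=
  if query_words.length ≤ 1 then false
  else pvLoopB (pvBuildFirstPos desc_words) query_words none 0

-- ===== PRECONDITION & SPEC =====
def Spec_check_word_order_relevance (query_words : List String) (desc_words : List String) (out : Bool) : Prop := out = check_word_order_relevance_alt query_words desc_words
instance (query_words : List String) (desc_words : List String) (out : Bool) : Decidable (Spec_check_word_order_relevance query_words desc_words out) := by unfold Spec_check_word_order_relevance; infer_instance

-- ===== CLAIM (what is proved, stated in full; the proofs are below) =====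
def Claim_equal_check_word_order_relevance : Prop := ∀ (query_words : List String) (desc_words : List String), Dom_check_word_order_relevance query_words desc_words → Spec_check_word_order_relevance query_words desc_words (check_word_order_relevance query_words desc_words)

-- ===== LEMMAS AND PROOFS =====

def pvCast : Option Nat → Option Int
  | none => none
  | some n => some (Int.ofNat n)

theorem pvCast_none : pvCast none = none := rfl
theorem pvCast_some (n : Nat) : pvCast (some n) = some (n : Int) := rfl

-- adjacent non-decreasing chain, tracking the previous position
def pvChainOk : Option Nat → List Nat → Bool
  | _, [] => true
  | prev, i :: is => (match prev with | some p => decide (p ≤ i) | none => true) && pvChainOk (some i) is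

theorem pvChainOk_iff (ps : List Nat) (p : Nat) :
    pvChainOk (some p) ps = true ↔ List.IsChain (fun a b => a ≤ b) (p :: ps) := by
  induction ps generalizing p with
  | nil => simp [pvChainOk]
  | cons i is ih => rw [List.isChain_cons_cons]; simp [pvChainOk, ih]

theorem pvBuild_aux (w : String) (xs : List String) (s : Int) (d : PySem.Dict String Int) :
    ((PySem.List.enumerate xs s).foldl
      (fun d iw => if (d.get? iw.2).isSome then d else d.insert iw.2 iw.1) d).get? w
      = (d.get? w).or ((pvCast (PySem.List.index? xs w)).map (fun z => z + s)) := by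
  induction xs generalizing s d with
  | nil =>
    rw [PySem.List.enumerate_nil, List.foldl_nil]
    rw [(PySem.List.index?_eq_none_iff ([] : List String) w).mpr (by simp)]
    cases d.get? w <;> simp [pvCast, Option.or]
  | cons x xs ih =>
    rw [PySem.List.enumerate_cons, List.foldl_cons, ih]
    by_cases hx : x = w
    · subst hx
      rw [PySem.List.index?_cons_self, pvCast_some]
      cases h : d.get? x with
      | some v => simp [h, Option.or]
      | none =>
        simp only [Option.isSome_none, Bool.false_eq_true, if_false,
          PySem.Dict.get?_insert_self]
        simp [Option.or]
    · rw [PySem.List.index?_cons_of_ne xs hx]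
      have hgw : (if (d.get? x).isSome then d else d.insert x s).get? w = d.get? w := by
        by_cases hdx : (d.get? x).isSome
        · rw [if_pos hdx]
        · rw [if_neg hdx, PySem.Dict.get?_insert_of_ne d s (Ne.symm hx)]
      rw [hgw]
      cases hi : PySem.List.index? xs w with
      | none => simp [pvCast]
      | some n =>
        simp only [Option.map_some, pvCast_some]
        have h3 : (n : Int) + (s + 1) = ((n + 1 : Nat) : Int) + s := by push_cast; ring
        rw [h3]

theorem pvFirstPos_get (desc : List String) (w : String) :
    (pvBuildFirstPos desc).get? w = pvCast (PySem.List.index? desc w) := by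
  unfold pvBuildFirstPos
  rw [pvBuild_aux, PySem.Dict.get?_empty]
  cases PySem.List.index? desc w <;> simp [Option.or, pvCast]

-- A's positions accumulator is a filterMap of first indices
theorem pvPositions_eq (desc : List String) (q : List String) (acc : List Nat) :
    q.foldl (fun acc w =>
      if w ∈ desc then
        match PySem.List.index? desc w with
        | some i => acc ++ [i]
        | none => acc
      else acc) acc = acc ++ q.filterMap (PySem.List.index? desc) := by
  induction q generalizing acc with
  | nil => simp
  | cons w ws ih =>
    rw [List.foldl_cons, List.filterMap_cons]
    cases h : PySem.List.index? desc w with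
    | some i =>
      have hw : w ∈ desc := (PySem.List.index?_isSome_iff desc w).mp (by rw [h]; rfl)
      rw [if_pos hw]
      exact (ih (acc ++ [i])).trans (by simp)
    | none =>
      have hw : w ∉ desc := (PySem.List.index?_eq_none_iff desc w).mp h
      rw [if_neg hw]
      exact ih acc

-- B's single pass computes: chain-ok on the filterMap of first indices, and final count > 1
theorem pvLoopB_eq (desc : List String) (q : List String) (prev : Option Nat) (found : Int) :
    pvLoopB (pvBuildFirstPos desc) q (pvCast prev) found
      = (pvChainOk prev (q.filterMap (PySem.List.index? desc))
          && decide (1 < found + ((q.filterMap (PySem.List.index? desc)).length : Int))) := by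
  induction q generalizing prev found with
  | nil => simp [pvLoopB, pvChainOk]
  | cons w ws ih =>
    rw [List.filterMap_cons]
    show (match (pvBuildFirstPos desc).get? w with
      | none => pvLoopB (pvBuildFirstPos desc) ws (pvCast prev) found
      | some i =>
        if (match pvCast prev with | some p => decide (i < p) | none => false) then false
        else pvLoopB (pvBuildFirstPos desc) ws (some i) (found + 1)) = _
    rw [pvFirstPos_get]
    cases h : PySem.List.index? desc w with
    | none => rw [pvCast_none]; exact ih prev found
    | some i =>
      rw [pvCast_some]
      show (if (match pvCast prev with | some p => decide ((i:Int) < p) | none => false) then false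
        else pvLoopB (pvBuildFirstPos desc) ws (some (i:Int)) (found + 1)) = _
      have hih := ih (some i) (found + 1)
      rw [pvCast_some] at hih
      cases prev with
      | none =>
        rw [pvCast_none]
        simp only [hih, pvChainOk, Bool.true_and, List.length_cons]
        refine congrArg₂ (· && ·) rfl ?_
        exact decide_eq_decide.mpr (by push_cast; omega)
      | some p =>
        rw [pvCast_some]
        by_cases hip : (i : Int) < (p : Int)
        · have hnp : ¬ (p ≤ i) := by exact_mod_cast not_le.mpr hip
          simp [hip, pvChainOk, hnp]
        · have hple : p ≤ i := by exact_mod_cast not_lt.mp hip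
          simp only [hip, decide_false, Bool.false_eq_true, if_false, hih,
            pvChainOk, hple, decide_true, Bool.true_and, List.length_cons]
          refine congrArg₂ (· && ·) rfl ?_
          exact decide_eq_decide.mpr (by push_cast; omega)

-- sorted(ps) == ps exactly when ps is an adjacent non-decreasing chain
theorem pvSorted_eq_chainOk (ps : List Nat) :
    (ps == PySem.List.sorted ps (fun x => x) false) = pvChainOk none ps := by
  cases ps with
  | nil => simp [pvChainOk, PySem.List.sorted]
  | cons p t =>
    have hrw : pvChainOk none (p :: t) = pvChainOk (some p) t := by simp [pvChainOk]
    rw [hrw]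
    by_cases h : List.IsChain (fun a b => a ≤ b) (p :: t)
    · have hpw : (p :: t).Pairwise (fun a b => a ≤ b) := List.isChain_iff_pairwise.mp h
      rw [PySem.List.sorted_eq_self_of_pairwise (p :: t) (fun x => x) (by simpa using hpw)]
      simp [(pvChainOk_iff t p).mpr h]
    · have h2 : pvChainOk (some p) t = false := by
        cases hc : pvChainOk (some p) t
        · rfl
        · exact absurd ((pvChainOk_iff t p).mp hc) h
      rw [h2]
      cases he : ((p :: t) == PySem.List.sorted (p :: t) (fun x => x) false)
      · rfl
      · exfalso
        apply h
        apply List.isChain_iff_pairwise.mpr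
        have hp := PySem.List.sorted_pairwise (p :: t) (fun x => x)
        rw [← eq_of_beq he] at hp
        simpa using hp

-- ===== VERDICT (by name: the statement is the Claim_ definition above) =====
theorem check_word_order_relevance_spec : Claim_equal_check_word_order_relevance := by
  intro q d _
  unfold Spec_check_word_order_relevance check_word_order_relevance check_word_order_relevance_alt
  by_cases hlen : q.length ≤ 1
  · simp [hlen]
  · simp only [hlen, if_false]
    rw [pvPositions_eq, List.nil_append]
    have hB := pvLoopB_eq d q none 0
    rw [pvCast_none] at hB
    rw [hB, pvSorted_eq_chainOk]
    by_cases h1 : 1 < (q.filterMap (PySem.List.index? d)).length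
    · rw [if_pos h1]
      have h2 : decide (1 < (0:Int) + ((q.filterMap (PySem.List.index? d)).length : Int)) = true :=
        decide_eq_true (by omega)
      rw [h2, Bool.and_true]
    · rw [if_neg h1]
      have h2 : decide (1 < (0:Int) + ((q.filterMap (PySem.List.index? d)).length : Int)) = false :=
        decide_eq_false (by omega)
      rw [h2, Bool.and_false]
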